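-- pv_equiv track=rewrite | github.com/aswin-setiadi/belajar | motional/interview1.py | solve
-- ===== SOURCE A (Python) =====
-- def solve(
--     velocities: list[tuple[int, int]], limits: list[tuple[int, int]]
-- ) -> list[tuple[int, int]]:
--     start = None
--     speed_limit = limits[0][0]
--     limits_index = 1
--     ans: list[tuple[int, int]] = []
--     for item in velocities:
--         if limits_index < len(limits):
--             if limits[limits_index][0] <= item[0]:
--                 speed_limit = limits[limits_index][1]
--                 limits_index += 1
--
--         if item[1] > speed_limit:
--             if start is None:
--                 start = item[0]
--         else:
--             # below speed limit
--             if start is not None: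
--                 ans.append((start, item[0]))
--                 start = None
--
--     if start is not None:
--         ans.append((start, velocities[-1][0] + 1))
--
--     return ans
-- ===== SOURCE B (Python) =====
-- def solve(
--     velocities: list[tuple[int, int]], limits: list[tuple[int, int]]
-- ) -> list[tuple[int, int]]:
--     # effective speed limit for each sample (the limits pointer advances at most once per sample)
--     sls = []
--     sl, i = limits[0][0], 1
--     for t, _ in velocities:
--         if i < len(limits) and limits[i][0] <= t:
--             sl, i = limits[i][1], i + 1
--         sls.append(sl)
--     times = [t for t, _ in velocities]
--     flags = [v > l for (_, v), l in zip(velocities, sls)]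
--     # edge detection: a rising edge opens an interval, a falling edge closes one
--     prev = [False] + flags[:-1]
--     rises = [t for t, f, p in zip(times, flags, prev) if f and not p]
--     falls = [t for t, f, p in zip(times, flags, prev) if p and not f]
--     if flags and flags[-1]:
--         falls.append(times[-1] + 1)
--     return list(zip(rises, falls))
-- ===== Notes on version B (the rewrite author's own statement) =====
-- stated objective: alternative
-- what changed: B drops A's open/close state machine: it computes per-sample effective limits and boolean exceed flags, detects rising/falling edges by comparing the flag list with its shifted copy, and zips the rise times with the fall times to form the intervals.
import Mathlib
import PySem

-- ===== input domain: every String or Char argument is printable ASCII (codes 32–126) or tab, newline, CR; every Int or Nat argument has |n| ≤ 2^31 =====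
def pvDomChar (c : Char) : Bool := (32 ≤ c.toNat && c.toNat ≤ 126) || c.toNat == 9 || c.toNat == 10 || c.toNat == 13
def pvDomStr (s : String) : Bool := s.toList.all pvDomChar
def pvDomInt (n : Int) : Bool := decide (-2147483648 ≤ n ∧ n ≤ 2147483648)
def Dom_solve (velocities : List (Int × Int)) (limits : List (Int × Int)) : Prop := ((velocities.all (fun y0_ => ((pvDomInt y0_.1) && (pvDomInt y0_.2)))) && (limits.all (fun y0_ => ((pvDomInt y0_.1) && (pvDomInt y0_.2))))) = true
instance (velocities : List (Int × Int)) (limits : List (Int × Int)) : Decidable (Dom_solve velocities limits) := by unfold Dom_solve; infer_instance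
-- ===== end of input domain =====

-- B replaces A's open/close state machine by edge detection on an exceed-flag list (zip with shifted flags, then zip rises with falls); same cost.

-- ===== PORT A =====
-- A's single loop; state = (speed_limit, limits_index, start, ans), as in the Python.
def solveLoopA : List (Int × Int) → List (Int × Int) → Int → Nat → Option Int → List (Int × Int) → Option Int × List (Int × Int)
  | [], _, _, _, start, ans => (start, ans)
  | (t, v) :: rest, limits, sl, i, start, ans =>
    let p : Int × Nat :=
      if i < limits.length ∧ (limits.getD i (0, 0)).1 ≤ t then ((limits.getD i (0, 0)).2, i + 1)
      else (sl, i)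
    if v > p.1 then
      solveLoopA rest limits p.1 p.2 (if start.isNone then some t else start) ans
    else
      match start with
      | some s => solveLoopA rest limits p.1 p.2 none (ans ++ [(s, t)])
      | none => solveLoopA rest limits p.1 p.2 none ans

def solve (velocities : List (Int × Int)) (limits : List (Int × Int)) : List (Int × Int) :=
  -- limits[0][0]: Python raises IndexError on limits = []; Pre_solve excludes that, so headD's default is unreachable.
  let r := solveLoopA velocities limits (limits.headD (0, 0)).1 1 none []
  match r.1 with
  | some s =>
    -- velocities[-1]: only reached with start ≠ None, hence velocities ≠ []; the getD default is unreachable.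
    r.2 ++ [(s, ((PySem.List.pyGet? velocities (-1)).getD (0, 0)).1 + 1)]
  | none => r.2

-- ===== PORT B =====
-- B's first loop: the effective speed limit for each sample (pointer advances at most once per sample).
def limitsPerSample : List (Int × Int) → List (Int × Int) → Int → Nat → List Int
  | [], _, _, _ => []
  | (t, _) :: rest, limits, sl, i =>
    let p : Int × Nat :=
      if i < limits.length ∧ (limits.getD i (0, 0)).1 ≤ t then ((limits.getD i (0, 0)).2, i + 1)
      else (sl, i)
    p.1 :: limitsPerSample rest limits p.1 p.2

def solve_alt (velocities : List (Int × Int)) (limits : List (Int × Int)) : List (Int × Int) :=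
  let sls := limitsPerSample velocities limits (limits.headD (0, 0)).1 1
  let times := velocities.map Prod.fst
  let flags := (velocities.zip sls).map (fun x => decide (x.1.2 > x.2))
  let prev := false :: flags.dropLast
  let rises := ((times.zip (flags.zip prev)).filter (fun x => x.2.1 && !x.2.2)).map Prod.fst
  let falls0 := ((times.zip (flags.zip prev)).filter (fun x => !x.2.1 && x.2.2)).map Prod.fst
  -- 'if flags and flags[-1]': getLastD false is exactly that; times[-1] is only read with flags (hence times) nonempty.
  let falls := if flags.getLastD false then falls0 ++ [times.getLastD 0 + 1] else falls0
  rises.zip falls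

-- ===== PRECONDITION & SPEC =====
-- Pre_solve excludes only limits = [], where the Python A raises IndexError on limits[0][0].
def Pre_solve (velocities : List (Int × Int)) (limits : List (Int × Int)) : Prop := limits ≠ []
instance (velocities : List (Int × Int)) (limits : List (Int × Int)) : Decidable (Pre_solve velocities limits) := by unfold Pre_solve; infer_instance
def pvWitness_solve : (List (Int × Int)) × (List (Int × Int)) := ([(0, 5), (1, 2), (2, 9)], [(0, 3), (2, 4)])

def Spec_solve (velocities : List (Int × Int)) (limits : List (Int × Int)) (out : List (Int × Int)) : Prop := out = solve_alt velocities limits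
instance (velocities : List (Int × Int)) (limits : List (Int × Int)) (out : List (Int × Int)) : Decidable (Spec_solve velocities limits out) := by unfold Spec_solve; infer_instance

-- ===== CLAIM =====
def Claim_equal_solve : Prop := ∀ (velocities : List (Int × Int)) (limits : List (Int × Int)), Dom_solve velocities limits → Pre_solve velocities limits → Spec_solve velocities limits (solve velocities limits)

-- ===== LEMMAS AND PROOFS =====

-- The annotated sample list (time, exceeds-flag) both programs are secretly about.
def flaggedOf : List (Int × Int) → List (Int × Int) → Int → Nat → List (Int × Bool)
  | [], _, _, _ => []
  | (t, v) :: rest, limits, sl, i =>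
    let p : Int × Nat :=
      if i < limits.length ∧ (limits.getD i (0, 0)).1 ≤ t then ((limits.getD i (0, 0)).2, i + 1)
      else (sl, i)
    (t, decide (v > p.1)) :: flaggedOf rest limits p.1 p.2

-- The run-collecting machine (A's second half) over a flag list.
def runsB : List (Int × Bool) → Option Int → List (Int × Int) → Option Int × List (Int × Int)
  | [], start, ans => (start, ans)
  | (t, ex) :: rest, start, ans =>
    if ex then runsB rest (if start.isNone then some t else start) ans
    else
      match start with
      | some s => runsB rest none (ans ++ [(s, t)])
      | none => runsB rest none ans

def closeAt (e : Int) : Option Int × List (Int × Int) → List (Int × Int)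
  | (some s, ans) => ans ++ [(s, e)]
  | (none, ans) => ans

-- Edge extraction, recursively (B's zip/filter comprehensions compute exactly this).
def edgesOf (q : Bool → Bool → Bool) : List (Int × Bool) → Bool → List Int
  | [], _ => []
  | (t, f) :: rest, p => (if q f p then [t] else []) ++ edgesOf q rest f

def pendOf : Option Int → List Int
  | none => []
  | some s => [s]

theorem loopA_eq_runs_flagged (vs limits : List (Int × Int)) (sl : Int) (i : Nat)
    (start : Option Int) (ans : List (Int × Int)) :
    solveLoopA vs limits sl i start ans = runsB (flaggedOf vs limits sl i) start ans := by
  induction vs generalizing sl i start ans with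
  | nil => rfl
  | cons x rest ih =>
    obtain ⟨t, v⟩ := x
    simp only [solveLoopA, flaggedOf, runsB]
    by_cases hv : v > (if i < limits.length ∧ (limits.getD i (0, 0)).1 ≤ t then ((limits.getD i (0, 0)).2, i + 1) else (sl, i)).1
    · simp [hv, ih]
    · cases start <;> simp [hv, ih]

theorem flagged_map_fst (vs limits : List (Int × Int)) (sl : Int) (i : Nat) :
    (flaggedOf vs limits sl i).map Prod.fst = vs.map Prod.fst := by
  induction vs generalizing sl i with
  | nil => rfl
  | cons x rest ih => obtain ⟨t, v⟩ := x; simp [flaggedOf, ih]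

theorem flagged_map_snd (vs limits : List (Int × Int)) (sl : Int) (i : Nat) :
    (flaggedOf vs limits sl i).map Prod.snd
      = (vs.zip (limitsPerSample vs limits sl i)).map (fun x => decide (x.1.2 > x.2)) := by
  induction vs generalizing sl i with
  | nil => rfl
  | cons x rest ih => obtain ⟨t, v⟩ := x; simp [flaggedOf, limitsPerSample, ih]

-- B's filter over (time, flag, shifted flag) equals recursive edge extraction.
theorem zip_filter_eq_edges (q : Bool → Bool → Bool) (F : List (Int × Bool)) (p : Bool) :
    (((F.map Prod.fst).zip ((F.map Prod.snd).zip (p :: (F.map Prod.snd).dropLast))).filter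
        (fun x => q x.2.1 x.2.2)).map Prod.fst = edgesOf q F p := by
  induction F generalizing p with
  | nil => rfl
  | cons x rest ih =>
    obtain ⟨t, f⟩ := x
    cases rest with
    | nil => by_cases h : q f p <;> simp [edgesOf, h]
    | cons y ys =>
      have hrec := ih (p := f)
      simp only [List.map_cons, List.dropLast_cons₂, List.zip_cons_cons] at hrec ⊢
      simp only [List.filter_cons, apply_ite (List.map Prod.fst), List.map_cons] at hrec ⊢
      rw [hrec]
      cases hq : q f p <;> simp [edgesOf, hq]

-- The run machine, closed at e, equals pending rise + rises zipped with falls (+ closing fall when the last flag is up).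
theorem runs_close_eq_edges (F : List (Int × Bool)) (start : Option Int)
    (ans : List (Int × Int)) (e : Int) (hp : start.isSome = p) :
    closeAt e (runsB F start ans)
      = ans ++ ((pendOf start ++ edgesOf (fun f pf => f && !pf) F p).zip
          (edgesOf (fun f pf => !f && pf) F p
            ++ (if (F.map Prod.snd).getLastD p then [e] else []))) := by
  induction F generalizing start ans p with
  | nil =>
    cases start with
    | none => simp_all [runsB, closeAt, pendOf, edgesOf]
    | some s => simp_all [runsB, closeAt, pendOf, edgesOf]
  | cons x rest ih =>
    obtain ⟨t, f⟩ := x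
    subst hp
    simp only [List.map_cons, List.getLastD_cons]
    cases start with
    | none =>
      cases f with
      | false => simpa [runsB, edgesOf] using ih (p := false) none ans rfl
      | true => simpa [runsB, edgesOf, pendOf] using ih (p := true) (some t) ans rfl
    | some s =>
      cases f with
      | false =>
        have := ih (p := false) none (ans ++ [(s, t)]) rfl
        simpa [runsB, edgesOf, pendOf, List.zip_cons_cons] using this
      | true => simpa [runsB, edgesOf, pendOf] using ih (p := true) (some s) ans rfl

theorem pyGet_neg_one_fst (vs : List (Int × Int)) :
    ((PySem.List.pyGet? vs (-1)).getD (0, 0)).1 = (vs.map Prod.fst).getLastD 0 := by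
  rw [PySem.List.pyGet?_neg_one]
  cases h : vs.getLast? with
  | none =>
    have : vs = [] := List.getLast?_eq_none_iff.mp h
    simp [this]
  | some x =>
    have : (vs.map Prod.fst).getLast? = some x.1 := by
      rw [List.getLast?_map, h]; rfl
    simp [List.getLastD_eq_getLast?, this]

-- ===== VERDICT =====
theorem solve_spec : Claim_equal_solve := by
  intro velocities limits _ _
  unfold Spec_solve solve solve_alt
  have hF := loopA_eq_runs_flagged velocities limits (limits.headD (0, 0)).1 1 none []
  set F := flaggedOf velocities limits (limits.headD (0, 0)).1 1
  have hfst : velocities.map Prod.fst = F.map Prod.fst := (flagged_map_fst _ _ _ _).symm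
  have hsnd : (velocities.zip (limitsPerSample velocities limits (limits.headD (0, 0)).1 1)).map
      (fun x => decide (x.1.2 > x.2)) = F.map Prod.snd := (flagged_map_snd _ _ _ _).symm
  have hclose := runs_close_eq_edges F none [] ((velocities.map Prod.fst).getLastD 0 + 1) (p := false) rfl
  have hA : (match (solveLoopA velocities limits (limits.headD (0, 0)).1 1 none []).1 with
      | some s => (solveLoopA velocities limits (limits.headD (0, 0)).1 1 none []).2
          ++ [(s, ((PySem.List.pyGet? velocities (-1)).getD (0, 0)).1 + 1)]
      | none => (solveLoopA velocities limits (limits.headD (0, 0)).1 1 none []).2)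
      = closeAt ((velocities.map Prod.fst).getLastD 0 + 1) (runsB F none []) := by
    rw [hF, pyGet_neg_one_fst]
    cases h : (runsB F none []) with
    | mk a b => cases a <;> simp [closeAt]
  rw [hA, hclose]
  simp only [pendOf, List.nil_append]
  rw [hsnd, hfst, ← zip_filter_eq_edges (fun f pf => f && !pf) F false,
    ← zip_filter_eq_edges (fun f pf => !f && pf) F false]
  split_ifs <;> simp
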